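-- pv_equiv track=rewrite | github.com/TheEdrik/wolib | dev/sat_tools.py | dimacs2clauses_itr
-- ===== SOURCE A (Python) =====
-- def dimacs2clauses_itr(dimacs):
-- 	in_lead = True
--
-- 	for di, d in enumerate(dimacs):
-- 		if d.startswith('p') or d.startswith('c'):
-- 			if in_lead:
-- 				continue
-- 			raise ValueError("malformed DIMACS lead/comment " +
-- 					f"(line {di}) ({d})")
--
-- 		in_lead = False
-- 		yield d
-- ===== SOURCE B (Python) =====
-- def dimacs2clauses_itr(dimacs):
-- 	# Eager slice-based version: locate end of the 'p'/'c' lead, validate the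
-- 	# remainder up front (same ValueError, same line index), then yield the slice.
-- 	lines = list(dimacs)
-- 	start = next((i for i, d in enumerate(lines)
-- 	              if not d.startswith(('p', 'c'))), len(lines))
-- 	body = lines[start:]
-- 	for off, d in enumerate(body):
-- 		if d.startswith(('p', 'c')):
-- 			raise ValueError("malformed DIMACS lead/comment " +
-- 					f"(line {start + off}) ({d})")
-- 	yield from body
-- ===== Notes on version B (the rewrite author's own statement) =====
-- stated objective: alternative
-- what changed: Replaces A's flag-driven lazy loop by an eager three-stage version: find the length of the 'p'/'c' lead with a single index search, validate the remaining slice up front (raising the identical ValueError), then yield the slice; no mutable flag remains.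
import Mathlib
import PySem

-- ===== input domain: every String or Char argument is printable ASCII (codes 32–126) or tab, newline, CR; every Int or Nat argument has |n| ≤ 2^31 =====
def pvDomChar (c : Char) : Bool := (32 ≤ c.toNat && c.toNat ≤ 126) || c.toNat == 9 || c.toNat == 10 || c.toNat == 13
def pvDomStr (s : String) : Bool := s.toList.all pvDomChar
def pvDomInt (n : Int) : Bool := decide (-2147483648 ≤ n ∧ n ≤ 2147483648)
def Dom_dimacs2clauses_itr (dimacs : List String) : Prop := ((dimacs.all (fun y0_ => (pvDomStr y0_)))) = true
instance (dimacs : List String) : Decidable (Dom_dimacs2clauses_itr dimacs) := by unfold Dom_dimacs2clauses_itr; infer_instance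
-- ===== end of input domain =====

-- B replaces A's flag-driven generator loop by an eager find-the-lead / validate / slice version (alternative, same cost).
-- Both Pythons are generators; the equivalence is about the list of yielded values.
-- On inputs with a 'p'/'c' line after the lead both Pythons raise ValueError; Pre_ excludes those
-- (the ports return [] there, a value the claim does not cover).

-- ===== PORT A =====
def pvIsLead (d : String) : Bool := PySem.Str.startswith d "p" || PySem.Str.startswith d "c"

-- A's for-loop with the in_lead flag; none = the ValueError path
def pvGoA (in_lead : Bool) : List String → Option (List String)
  | [] => some []
  | d :: rest =>
      if pvIsLead d then
        if in_lead then pvGoA in_lead rest else none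
      else
        (pvGoA false rest).map (d :: ·)

def dimacs2clauses_itr (dimacs : List String) : List String :=
  (pvGoA true dimacs).getD []   -- the none (raise) case is excluded by Pre_

-- ===== PORT B =====
-- d.startswith(('p', 'c'))
def pvLeadB (d : String) : Bool := ["p", "c"].any (fun pfx => PySem.Str.startswith d pfx)

def dimacs2clauses_itr_alt (dimacs : List String) : List String :=
  -- start = next((i for i, d in enumerate(lines) if not lead(d)), len(lines)); findIdx is exactly that
  let start := dimacs.findIdx (fun d => !pvLeadB d)
  -- body = lines[start:]; start is a nonnegative in-range index, so the slice is List.drop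
  let body := dimacs.drop start
  -- the validation loop: any lead line in body is the ValueError path (excluded by Pre_)
  if body.any pvLeadB then [] else body

-- ===== PRECONDITION & SPEC =====
-- Pre_ excludes exactly the inputs on which the Python A raises ValueError:
-- those with a 'p'/'c' line after the first non-'p'/'c' line.
def Pre_dimacs2clauses_itr (dimacs : List String) : Prop :=
  (dimacs.dropWhile pvIsLead).all (fun d => !pvIsLead d) = true
instance (dimacs : List String) : Decidable (Pre_dimacs2clauses_itr dimacs) := by
  unfold Pre_dimacs2clauses_itr; infer_instance
def pvWitness_dimacs2clauses_itr : List String := ["p cnf 2 2", "c comment", "1 2 0", "-1 0"]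

def Spec_dimacs2clauses_itr (dimacs : List String) (out : List String) : Prop := out = dimacs2clauses_itr_alt dimacs
instance (dimacs : List String) (out : List String) : Decidable (Spec_dimacs2clauses_itr dimacs out) := by unfold Spec_dimacs2clauses_itr; infer_instance

-- ===== CLAIM (what is proved, stated in full; the proofs are below) =====
def Claim_equal_dimacs2clauses_itr : Prop := ∀ (dimacs : List String), Dom_dimacs2clauses_itr dimacs → Pre_dimacs2clauses_itr dimacs → Spec_dimacs2clauses_itr dimacs (dimacs2clauses_itr dimacs)

-- ===== LEMMAS AND PROOFS =====
theorem pvLeadB_eq (d : String) : pvLeadB d = pvIsLead d := by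
  simp [pvLeadB, pvIsLead]

-- A's loop with the flag lowered: strips nothing, fails on the first lead line
def pvGoTail : List String → Option (List String)
  | [] => some []
  | d :: rest =>
      if pvIsLead d then none
      else (pvGoTail rest).map (d :: ·)

theorem pvGoA_false_eq : ∀ (l : List String), pvGoA false l = pvGoTail l := by
  intro l
  induction l with
  | nil => rfl
  | cons d rest ih =>
      simp only [pvGoA, pvGoTail]
      by_cases h : pvIsLead d = true <;> simp [h, ih]

-- A's full loop = skip the lead, then the tail loop
theorem pvGoA_true_eq : ∀ (l : List String), pvGoA true l = pvGoTail (l.dropWhile pvIsLead) := by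
  intro l
  induction l with
  | nil => rfl
  | cons d rest ih =>
      by_cases h : pvIsLead d = true
      · simpa [pvGoA, h] using ih
      · simp [pvGoA, h, pvGoA_false_eq rest, pvGoTail]

theorem pvGoTail_all (l : List String) (h : l.all (fun d => !pvIsLead d) = true) :
    pvGoTail l = some l := by
  induction l with
  | nil => rfl
  | cons d rest ih =>
      simp only [List.all_cons, Bool.and_eq_true, Bool.not_eq_true'] at h
      simp [pvGoTail, h.1, ih h.2]

theorem pvDrop_findIdx (l : List String) :
    l.drop (l.findIdx (fun d => !pvIsLead d)) = l.dropWhile pvIsLead := by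
  induction l with
  | nil => rfl
  | cons d rest ih =>
      by_cases h : pvIsLead d = true
      · simp [List.findIdx_cons, h, ih]
      · simp [List.findIdx_cons, h]

-- ===== VERDICT (by name: the statement is the Claim_ definition above) =====
theorem dimacs2clauses_itr_spec : Claim_equal_dimacs2clauses_itr := by
  intro dimacs _ hpre
  have hfun : (fun d => !pvLeadB d) = (fun d => !pvIsLead d) := funext fun d => by rw [pvLeadB_eq]
  have hany : (dimacs.dropWhile pvIsLead).any pvLeadB = false := by
    unfold Pre_dimacs2clauses_itr at hpre
    simp only [List.all_eq_true, Bool.not_eq_true'] at hpre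
    rw [List.any_eq_false]
    intro d hd; rw [pvLeadB_eq]; simp [hpre d hd]
  unfold Spec_dimacs2clauses_itr dimacs2clauses_itr dimacs2clauses_itr_alt
  rw [pvGoA_true_eq, pvGoTail_all _ hpre]
  show List.dropWhile pvIsLead dimacs =
    if (dimacs.drop (dimacs.findIdx (fun d => !pvLeadB d))).any pvLeadB = true then []
    else dimacs.drop (dimacs.findIdx (fun d => !pvLeadB d))
  rw [hfun, pvDrop_findIdx, hany]
  simp
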